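-- pv_equiv track=rewrite | github.com/dariuszlesiecki/Python-course | lab05/lab05.py | ZeroOne
-- ===== SOURCE A (Python) =====
-- def ZeroOne(a):
--     n=0
--     for i in a:
--         if i==0:
--             n+=1
--         else:
--             yield n
--             n=0
-- ===== SOURCE B (Python) =====
-- def ZeroOne(a):
--     # Two-phase run-length approach: first compress a into runs of
--     # (is_zero, length), then emit per nonzero run: the pending zero
--     # count, followed by one 0 for each further element of the run.
--     runs = []
--     for x in a:
--         k = (x == 0)
--         if runs and runs[-1][0] == k:
--             runs[-1][1] += 1
--         else:
--             runs.append([k, 1])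
--     n = 0
--     for k, c in runs:
--         if k:
--             n = c
--         else:
--             yield n
--             for _ in range(c - 1):
--                 yield 0
--             n = 0
-- ===== Notes on version B (the rewrite author's own statement) =====
-- stated objective: alternative
-- what changed: Replaces the per-element counter loop by a two-phase run-length encoding: the input is first compressed into (is_zero, length) runs, then each nonzero run emits the pending zero count followed by length-1 zeros.
import Mathlib
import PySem

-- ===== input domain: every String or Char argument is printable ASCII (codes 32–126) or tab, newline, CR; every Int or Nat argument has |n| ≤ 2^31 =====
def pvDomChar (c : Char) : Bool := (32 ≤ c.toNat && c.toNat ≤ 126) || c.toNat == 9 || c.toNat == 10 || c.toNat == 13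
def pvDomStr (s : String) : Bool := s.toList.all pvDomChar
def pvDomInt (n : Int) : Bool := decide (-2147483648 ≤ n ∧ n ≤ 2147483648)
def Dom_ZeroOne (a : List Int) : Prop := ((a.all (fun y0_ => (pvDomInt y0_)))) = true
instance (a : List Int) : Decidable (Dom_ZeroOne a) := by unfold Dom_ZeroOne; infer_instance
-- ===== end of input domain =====

-- B replaces A's per-element counter loop by a two-phase run-length encoding (same cost);
-- equivalence is about the list of yielded values of the generators.

-- ===== PORT A =====
-- A: one pass with a zero counter n; yield n at each nonzero element, then reset.
def ZeroOne (a : List Int) : List Int :=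
  (a.foldl (fun (s : Int × List Int) i =>
      if i == 0 then (s.1 + 1, s.2) else (0, s.2 ++ [s.1]))
    ((0 : Int), ([] : List Int))).2

-- ===== PORT B =====
-- phase 1 of Source B: compress into runs of (is_zero, length); the recursion carries the
-- current (last) run, mirroring the loop's mutable runs[-1].
def pvRunsAux (k : Bool) (c : Nat) : List Int → List (Bool × Nat)
  | [] => [(k, c)]
  | x :: xs =>
      if (x == 0) = k then pvRunsAux k (c + 1) xs
      else (k, c) :: pvRunsAux (x == 0) 1 xs

def pvRuns : List Int → List (Bool × Nat)
  | [] => []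
  | x :: xs => pvRunsAux (x == 0) 1 xs

-- phase 2 of Source B: emit per nonzero run the pending count n then c-1 zeros.
def pvEmit (n : Nat) : List (Bool × Nat) → List Int
  | [] => []
  | (true, c) :: rest => pvEmit c rest
  | (false, c) :: rest => (n : Int) :: (List.replicate (c - 1) 0 ++ pvEmit 0 rest)

def ZeroOne_alt (a : List Int) : List Int := pvEmit 0 (pvRuns a)

-- ===== PRECONDITION & SPEC =====
def Spec_ZeroOne (a : List Int) (out : List Int) : Prop := out = ZeroOne_alt a
instance (a : List Int) (out : List Int) : Decidable (Spec_ZeroOne a out) := by unfold Spec_ZeroOne; infer_instance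

-- ===== CLAIM (what is proved, stated in full; the proofs are below) =====
def Claim_equal_ZeroOne : Prop := ∀ (a : List Int), Dom_ZeroOne a → Spec_ZeroOne a (ZeroOne a)

-- ===== LEMMAS AND PROOFS =====

-- reference recursion: the stream A produces from counter state n
def pvGoA (n : Int) : List Int → List Int
  | [] => []
  | x :: xs => if x == 0 then pvGoA (n + 1) xs else n :: pvGoA 0 xs

theorem pvFoldA (a : List Int) : ∀ (n : Int) (acc : List Int),
    (a.foldl (fun (s : Int × List Int) i =>
        if i == 0 then (s.1 + 1, s.2) else (0, s.2 ++ [s.1])) (n, acc)).2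
      = acc ++ pvGoA n a := by
  induction a with
  | nil => intro n acc; simp [pvGoA]
  | cons x xs ih =>
      intro n acc
      by_cases hx : x = 0
      · subst hx
        simpa [pvGoA] using ih (n + 1) acc
      · simpa [pvGoA, hx] using ih 0 (acc ++ [n])

theorem pvEmitRuns (xs : List Int) : ∀ (k : Bool) (c n : Nat), 1 ≤ c →
    pvEmit n (pvRunsAux k c xs)
      = if k then pvGoA (c : Int) xs
        else (n : Int) :: (List.replicate (c - 1) 0 ++ pvGoA 0 xs) := by
  induction xs with
  | nil =>
      intro k c n hc
      cases k <;> simp [pvRunsAux, pvEmit, pvGoA]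
  | cons x xs ih =>
      intro k c n hc
      by_cases hx : x = 0
      · subst hx
        cases k with
        | true =>
            have h1 : pvRunsAux true c (0 :: xs) = pvRunsAux true (c + 1) xs := by
              simp [pvRunsAux]
            rw [h1, ih true (c + 1) n (by omega)]
            simp [pvGoA, Nat.cast_add]
        | false =>
            have h1 : pvRunsAux false c (0 :: xs) = (false, c) :: pvRunsAux true 1 xs := by
              simp [pvRunsAux]
            rw [h1]
            simp only [pvEmit]
            rw [ih true 1 0 (by omega)]
            simp [pvGoA]
      · have hx' : (x == 0) = false := by simp [hx]
        cases k with
        | true =>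
            have h1 : pvRunsAux true c (x :: xs) = (true, c) :: pvRunsAux false 1 xs := by
              simp [pvRunsAux, hx']
            rw [h1]
            simp only [pvEmit]
            rw [ih false 1 c (by omega)]
            simp [pvGoA, hx]
        | false =>
            have h1 : pvRunsAux false c (x :: xs) = pvRunsAux false (c + 1) xs := by
              simp [pvRunsAux, hx']
            rw [h1, ih false (c + 1) n (by omega),
              show c + 1 - 1 = (c - 1) + 1 from by omega, List.replicate_succ']
            simp [pvGoA, hx]

theorem pvAltGo (a : List Int) : ZeroOne_alt a = pvGoA 0 a := by
  cases a with
  | nil => simp [ZeroOne_alt, pvRuns, pvEmit, pvGoA]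
  | cons x xs =>
      by_cases hx : x = 0
      · subst hx
        simp [ZeroOne_alt, pvRuns, pvEmitRuns xs true 1 0 le_rfl, pvGoA]
      · have hx' : (x == 0) = false := by simp [hx]
        simp [ZeroOne_alt, pvRuns, hx', pvEmitRuns xs false 1 0 le_rfl, pvGoA]

-- ===== VERDICT (by name: the statement is the Claim_ definition above) =====
theorem ZeroOne_spec : Claim_equal_ZeroOne := by
  intro a _
  unfold Spec_ZeroOne ZeroOne
  rw [pvFoldA a 0 [], pvAltGo]
  simp
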